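-- pv_equiv track=rewrite | github.com/ZauryX/project_tetris | main.py | sozdanie_polya
-- ===== SOURCE A (Python) =====
-- def sozdanie_polya(occupied={}):
--     position = [
--         [(0, 0, 0), (0, 0, 0), (0, 0, 0), (0, 0, 0), (0, 0, 0), (0, 0, 0), (0, 0, 0), (0, 0, 0)],
--         [(0, 0, 0), (0, 0, 0), (0, 0, 0), (0, 0, 0), (0, 0, 0), (0, 0, 0), (0, 0, 0), (0, 0, 0)],
--         [(0, 0, 0), (0, 0, 0), (0, 0, 0), (0, 0, 0), (0, 0, 0), (0, 0, 0), (0, 0, 0), (0, 0, 0)],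
--         [(0, 0, 0), (0, 0, 0), (0, 0, 0), (0, 0, 0), (0, 0, 0), (0, 0, 0), (0, 0, 0), (0, 0, 0)],
--         [(0, 0, 0), (0, 0, 0), (0, 0, 0), (0, 0, 0), (0, 0, 0), (0, 0, 0), (0, 0, 0), (0, 0, 0)],
--         [(0, 0, 0), (0, 0, 0), (0, 0, 0), (0, 0, 0), (0, 0, 0), (0, 0, 0), (0, 0, 0), (0, 0, 0)],
--         [(0, 0, 0), (0, 0, 0), (0, 0, 0), (0, 0, 0), (0, 0, 0), (0, 0, 0), (0, 0, 0), (0, 0, 0)],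
--         [(0, 0, 0), (0, 0, 0), (0, 0, 0), (0, 0, 0), (0, 0, 0), (0, 0, 0), (0, 0, 0), (0, 0, 0)],
--         [(0, 0, 0), (0, 0, 0), (0, 0, 0), (0, 0, 0), (0, 0, 0), (0, 0, 0), (0, 0, 0), (0, 0, 0)],
--         [(0, 0, 0), (0, 0, 0), (0, 0, 0), (0, 0, 0), (0, 0, 0), (0, 0, 0), (0, 0, 0), (0, 0, 0)],
--         [(0, 0, 0), (0, 0, 0), (0, 0, 0), (0, 0, 0), (0, 0, 0), (0, 0, 0), (0, 0, 0), (0, 0, 0)],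
--         [(0, 0, 0), (0, 0, 0), (0, 0, 0), (0, 0, 0), (0, 0, 0), (0, 0, 0), (0, 0, 0), (0, 0, 0)], ]
--     # [(255, 0, 3), (255, 0, 3), (255, 0, 3), (0, 0, 0), (255, 0, 3), (255, 0, 3), (255, 0, 3), (255, 7, 3)]]
--     for i in range(len(position)):
--         for j in range(len(position[i])):
--             if (j, i) in occupied:
--                 a = occupied[(j, i)]
--                 position[i][j] = a
--
--     return position
-- ===== SOURCE B (Python) =====
-- def sozdanie_polya(occupied={}):
--     position = [[(0, 0, 0) for _ in range(8)] for _ in range(12)]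
--     for (j, i), color in occupied.items():
--         if 0 <= i < 12 and 0 <= j < 8:
--             position[i][j] = color
--     return position
-- ===== Notes on version B (the rewrite author's own statement) =====
-- stated objective: simpler
-- what changed: Instead of scanning all 96 cells and testing each against the dict, B builds the blank grid once and makes a single sparse pass over occupied.items(), writing each in-range entry directly. Pre_ excludes only association lists with duplicate (j,i) keys, which do not arise from any Python dict argument (the dict collapses them), so on them the list representation is ambiguous (first-vs-last match).
import Mathlib
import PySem

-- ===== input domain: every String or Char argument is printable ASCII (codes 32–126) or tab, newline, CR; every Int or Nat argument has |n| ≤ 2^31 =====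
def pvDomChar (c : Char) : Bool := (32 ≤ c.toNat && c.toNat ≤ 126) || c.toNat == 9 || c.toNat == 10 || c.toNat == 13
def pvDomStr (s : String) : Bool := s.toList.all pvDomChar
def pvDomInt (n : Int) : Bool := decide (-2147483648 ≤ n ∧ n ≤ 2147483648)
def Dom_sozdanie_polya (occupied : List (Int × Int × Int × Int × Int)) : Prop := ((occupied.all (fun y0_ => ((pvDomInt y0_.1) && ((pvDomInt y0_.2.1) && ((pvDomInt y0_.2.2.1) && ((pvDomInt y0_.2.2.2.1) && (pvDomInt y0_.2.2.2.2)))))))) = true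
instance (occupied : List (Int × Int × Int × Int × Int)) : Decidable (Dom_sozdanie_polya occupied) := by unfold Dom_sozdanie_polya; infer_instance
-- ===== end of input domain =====

-- B replaces A's dense 96-cell membership scan by one sparse pass over the dict's items (simpler; return value only).


-- shared helper: the Python statement 'position[i][j] = v' (both Pythons contain it verbatim); i, j are known nonneg and in range at every use
def pvCellWrite (pos : List (List (Int × Int × Int))) (i j : Int) (v : Int × Int × Int) : List (List (Int × Int × Int)) :=
  pos.set i.toNat ((pos.getD i.toNat []).set j.toNat v)

-- the 12×8 all-(0,0,0) grid (A writes it as a literal, B as a comprehension; same value)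
def pvBlank : List (List (Int × Int × Int)) := List.replicate 12 (List.replicate 8 ((0 : Int), (0 : Int), (0 : Int)))

-- ===== PORT A =====
-- '(j, i) in occupied' + 'occupied[(j, i)]' ported as first-match association-list lookup (exact: Pre_ makes keys unique);
-- range(len(position)) / range(len(position[i])) are the invariant 12 / 8.
def sozdanie_polya (occupied : List (Int × Int × Int × Int × Int)) : List (List (Int × Int × Int)) :=
  (PySem.List.pyRange 0 12 1).foldl (fun position i =>
    (PySem.List.pyRange 0 8 1).foldl (fun position j =>
      match occupied.find? (fun q => q.1 == j && q.2.1 == i) with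
      | some q => pvCellWrite position i j (q.2.2.1, q.2.2.2.1, q.2.2.2.2)
      | none => position) position) pvBlank

-- ===== PORT B =====
def sozdanie_polya_alt (occupied : List (Int × Int × Int × Int × Int)) : List (List (Int × Int × Int)) :=
  occupied.foldl (fun position q =>
    if 0 ≤ q.2.1 ∧ q.2.1 < 12 ∧ 0 ≤ q.1 ∧ q.1 < 8 then
      pvCellWrite position q.2.1 q.1 (q.2.2.1, q.2.2.2.1, q.2.2.2.2)
    else position) pvBlank

-- ===== PRECONDITION & SPEC =====
-- Pre_ excludes association lists with duplicate (j, i) keys: no Python dict argument produces one (a dict collapses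
-- duplicates), and on them the assoc-list representation of the dict is ambiguous (first-vs-last match).
def Pre_sozdanie_polya (occupied : List (Int × Int × Int × Int × Int)) : Prop :=
  (occupied.map (fun q => (q.1, q.2.1))).Nodup
instance (occupied : List (Int × Int × Int × Int × Int)) : Decidable (Pre_sozdanie_polya occupied) := by unfold Pre_sozdanie_polya; infer_instance

def pvWitness_sozdanie_polya : (List (Int × Int × Int × Int × Int)) := [(0, 0, 255, 0, 3), (2, 1, 9, 9, 9), (-1, 20, 7, 7, 7)]

def Spec_sozdanie_polya (occupied : List (Int × Int × Int × Int × Int)) (out : List (List (Int × Int × Int))) : Prop := out = sozdanie_polya_alt occupied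
instance (occupied : List (Int × Int × Int × Int × Int)) (out : List (List (Int × Int × Int))) : Decidable (Spec_sozdanie_polya occupied out) := by unfold Spec_sozdanie_polya; infer_instance

-- ===== CLAIM (what is proved, stated in full; the proofs are below) =====
def Claim_equal_sozdanie_polya : Prop := ∀ (occupied : List (Int × Int × Int × Int × Int)), Dom_sozdanie_polya occupied → Pre_sozdanie_polya occupied → Spec_sozdanie_polya occupied (sozdanie_polya occupied)

-- ===== LEMMAS AND PROOFS =====

-- cell read: position[i][j] with total defaults, for stating loop invariants
def pvCell (pos : List (List (Int × Int × Int))) (i j : Nat) : Int × Int × Int :=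
  (pos.getD i []).getD j ((0 : Int), (0 : Int), (0 : Int))

def pvShape (pos : List (List (Int × Int × Int))) : Prop :=
  pos.length = 12 ∧ ∀ r ∈ pos, r.length = 8

-- the first-match lookup both cell formulas share
def pvLk (occupied : List (Int × Int × Int × Int × Int)) (j i : Int) : Option (Int × Int × Int) :=
  (occupied.find? (fun q => q.1 == j && q.2.1 == i)).map (fun q => (q.2.2.1, q.2.2.2.1, q.2.2.2.2))

lemma pvGetD_getD (o : Option (Int × Int × Int)) (x : Int × Int × Int) : o.getD (o.getD x) = o.getD x := by
  cases o <;> simp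

lemma pvShape_blank : pvShape pvBlank := by
  refine ⟨by simp [pvBlank], ?_⟩
  intro r hr
  unfold pvBlank at hr
  rw [List.eq_of_mem_replicate hr]
  simp

lemma pvRowLen (pos : List (List (Int × Int × Int))) (h : pvShape pos) (n : Nat) (hn : n < 12) :
    (pos.getD n []).length = 8 := by
  have hlt : n < pos.length := by rw [h.1]; exact hn
  rw [List.getD_eq_getElem pos [] hlt]
  exact h.2 _ (pos.getElem_mem hlt)

lemma pvShape_cellWrite (pos : List (List (Int × Int × Int))) (i j : Int) (v : Int × Int × Int)
    (h : pvShape pos) (hi : 0 ≤ i ∧ i < 12) : pvShape (pvCellWrite pos i j v) := by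
  refine ⟨by simp [pvCellWrite, h.1], ?_⟩
  intro r hr
  rcases List.mem_or_eq_of_mem_set hr with hmem | heq
  · exact h.2 r hmem
  · subst heq
    simp only [List.length_set]
    exact pvRowLen pos h i.toNat (by omega)

lemma pvCell_cellWrite (pos : List (List (Int × Int × Int))) (i j : Int) (v : Int × Int × Int)
    (h : pvShape pos) (hi : 0 ≤ i ∧ i < 12) (hj : 0 ≤ j ∧ j < 8) (i' j' : Nat) (hi' : i' < 12) (hj' : j' < 8) :
    pvCell (pvCellWrite pos i j v) i' j' =
      if i = (i' : Int) ∧ j = (j' : Int) then v else pvCell pos i' j' := by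
  have h1 := h.1
  have hrow : (pos.getD i.toNat []).length = 8 := pvRowLen pos h i.toNat (by omega)
  unfold pvCell pvCellWrite
  set r := (pos.getD i.toNat []).set j.toNat v with hr
  have houter : (pos.set i.toNat r).getD i' [] = if i.toNat = i' then r else pos.getD i' [] := by
    rw [List.getD_eq_getElem?_getD, List.getElem?_set]
    by_cases hii : i.toNat = i'
    · rw [if_pos hii, if_pos (by omega : i.toNat < pos.length)]
      rw [if_pos hii]
      simp
    · rw [if_neg hii, if_neg hii, ← List.getD_eq_getElem?_getD]
  rw [houter]
  by_cases hii : i.toNat = i'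
  · rw [if_pos hii, hr]
    have hinner : ((pos.getD i.toNat []).set j.toNat v).getD j' ((0 : Int), (0 : Int), (0 : Int)) =
        if j.toNat = j' then v else (pos.getD i.toNat []).getD j' ((0 : Int), (0 : Int), (0 : Int)) := by
      rw [List.getD_eq_getElem?_getD, List.getElem?_set]
      by_cases hjj : j.toNat = j'
      · rw [if_pos hjj, if_pos (by omega : j.toNat < (pos.getD i.toNat []).length)]
        rw [if_pos hjj]
        simp
      · rw [if_neg hjj, if_neg hjj, ← List.getD_eq_getElem?_getD]
    rw [hinner]
    by_cases hjj : j.toNat = j'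
    · rw [if_pos hjj, if_pos (by omega : i = (i' : Int) ∧ j = (j' : Int))]
    · rw [if_neg hjj, if_neg (by omega : ¬(i = (i' : Int) ∧ j = (j' : Int))), hii]
  · rw [if_neg hii, if_neg (by omega : ¬(i = (i' : Int) ∧ j = (j' : Int)))]

-- one inner-loop step of A
lemma pvCell_stepA (occupied : List (Int × Int × Int × Int × Int)) (pos : List (List (Int × Int × Int)))
    (i j : Int) (h : pvShape pos) (hi : 0 ≤ i ∧ i < 12) (hj : 0 ≤ j ∧ j < 8) (i' j' : Nat) (hi' : i' < 12) (hj' : j' < 8) :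
    pvCell (match occupied.find? (fun q => q.1 == j && q.2.1 == i) with
            | some q => pvCellWrite pos i j (q.2.2.1, q.2.2.2.1, q.2.2.2.2)
            | none => pos) i' j' =
      if i = (i' : Int) ∧ j = (j' : Int) then (pvLk occupied j i).getD (pvCell pos i' j') else pvCell pos i' j' := by
  cases hfind : occupied.find? (fun q => q.1 == j && q.2.1 == i) with
  | none => simp [pvLk, hfind]
  | some q =>
    rw [pvCell_cellWrite pos i j _ h hi hj i' j' hi' hj']
    simp [pvLk, hfind]

lemma pvShape_stepA (occupied : List (Int × Int × Int × Int × Int)) (pos : List (List (Int × Int × Int)))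
    (i j : Int) (h : pvShape pos) (hi : 0 ≤ i ∧ i < 12) :
    pvShape (match occupied.find? (fun q => q.1 == j && q.2.1 == i) with
             | some q => pvCellWrite pos i j (q.2.2.1, q.2.2.2.1, q.2.2.2.2)
             | none => pos) := by
  cases occupied.find? (fun q => q.1 == j && q.2.1 == i) with
  | none => exact h
  | some q => exact pvShape_cellWrite _ _ _ _ h hi

lemma pvShape_innerA (occupied : List (Int × Int × Int × Int × Int)) (i : Int) (hi : 0 ≤ i ∧ i < 12)
    (js : List Int) :
    ∀ (pos : List (List (Int × Int × Int))), pvShape pos →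
    pvShape (js.foldl (fun position j =>
      match occupied.find? (fun q => q.1 == j && q.2.1 == i) with
      | some q => pvCellWrite position i j (q.2.2.1, q.2.2.2.1, q.2.2.2.2)
      | none => position) pos) := by
  induction js with
  | nil => exact fun pos h => h
  | cons jj js ih => exact fun pos h => ih _ (pvShape_stepA occupied pos i jj h hi)

lemma pvInnerA (occupied : List (Int × Int × Int × Int × Int)) (i : Int) (hi : 0 ≤ i ∧ i < 12) :
    ∀ (js : List Int), (∀ x ∈ js, 0 ≤ x ∧ x < 8) →
    ∀ (pos : List (List (Int × Int × Int))), pvShape pos →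
    ∀ (i' j' : Nat), i' < 12 → j' < 8 →
    pvCell (js.foldl (fun position j =>
      match occupied.find? (fun q => q.1 == j && q.2.1 == i) with
      | some q => pvCellWrite position i j (q.2.2.1, q.2.2.2.1, q.2.2.2.2)
      | none => position) pos) i' j' =
      if i = (i' : Int) ∧ (j' : Int) ∈ js then (pvLk occupied (j' : Int) i).getD (pvCell pos i' j') else pvCell pos i' j' := by
  intro js
  induction js with
  | nil =>
    intro _ pos _ i' j' _ _
    simp [List.foldl_nil]
  | cons jj js ih =>
    intro hjs pos hpos i' j' hi' hj'
    have hjj : 0 ≤ jj ∧ jj < 8 := hjs jj (by simp)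
    have hstep := pvCell_stepA occupied pos i jj hpos hi hjj i' j' hi' hj'
    rw [List.foldl_cons,
        ih (fun x hx => hjs x (by simp [hx])) _ (pvShape_stepA occupied pos i jj hpos hi) i' j' hi' hj',
        hstep]
    by_cases hii : i = (i' : Int)
    · subst hii
      by_cases hjeq : jj = (j' : Int)
      · subst hjeq
        simp [pvGetD_getD]
      · have hjeq' : ¬((j' : Int) = jj) := fun hx => hjeq hx.symm
        simp [hjeq, hjeq', List.mem_cons]
    · simp [hii]

lemma pvShape_outerA (occupied : List (Int × Int × Int × Int × Int)) (is : List Int)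
    (his : ∀ x ∈ is, 0 ≤ x ∧ x < 12) :
    ∀ (pos : List (List (Int × Int × Int))), pvShape pos →
    pvShape (is.foldl (fun position i =>
      (PySem.List.pyRange 0 8 1).foldl (fun position j =>
        match occupied.find? (fun q => q.1 == j && q.2.1 == i) with
        | some q => pvCellWrite position i j (q.2.2.1, q.2.2.2.1, q.2.2.2.2)
        | none => position) position) pos) := by
  induction is with
  | nil => exact fun pos h => h
  | cons ii is ih =>
    intro pos h
    rw [List.foldl_cons]
    exact ih (fun x hx => his x (by simp [hx])) _
      (pvShape_innerA occupied ii (his ii (by simp)) _ pos h)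

lemma pvOuterA (occupied : List (Int × Int × Int × Int × Int)) :
    ∀ (is : List Int), (∀ x ∈ is, 0 ≤ x ∧ x < 12) →
    ∀ (pos : List (List (Int × Int × Int))), pvShape pos →
    ∀ (i' j' : Nat), i' < 12 → j' < 8 →
    pvCell (is.foldl (fun position i =>
      (PySem.List.pyRange 0 8 1).foldl (fun position j =>
        match occupied.find? (fun q => q.1 == j && q.2.1 == i) with
        | some q => pvCellWrite position i j (q.2.2.1, q.2.2.2.1, q.2.2.2.2)
        | none => position) position) pos) i' j' =
      if (i' : Int) ∈ is then (pvLk occupied (j' : Int) (i' : Int)).getD (pvCell pos i' j') else pvCell pos i' j' := by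
  intro is
  induction is with
  | nil =>
    intro _ pos _ i' j' _ _
    simp [List.foldl_nil]
  | cons ii is ih =>
    intro his pos hpos i' j' hi' hj'
    have hii : 0 ≤ ii ∧ ii < 12 := his ii (by simp)
    have hrange : ∀ x ∈ PySem.List.pyRange 0 8 1, 0 ≤ x ∧ x < 8 := by
      intro x hx
      rw [PySem.List.mem_pyRange_one] at hx
      exact hx
    have hjmem : (j' : Int) ∈ PySem.List.pyRange 0 8 1 := by
      rw [PySem.List.mem_pyRange_one]; omega
    have hstep := pvInnerA occupied ii hii (PySem.List.pyRange 0 8 1) hrange pos hpos i' j' hi' hj'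
    rw [List.foldl_cons,
        ih (fun x hx => his x (by simp [hx])) _
          (pvShape_innerA occupied ii hii _ pos hpos) i' j' hi' hj',
        hstep]
    by_cases hieq : ii = (i' : Int)
    · subst hieq
      simp [hjmem, pvGetD_getD]
    · have hieq' : ¬((i' : Int) = ii) := fun hx => hieq hx.symm
      simp [hieq, hieq', List.mem_cons]

lemma pvShapeB (l : List (Int × Int × Int × Int × Int)) :
    ∀ (pos : List (List (Int × Int × Int))), pvShape pos →
    pvShape (l.foldl (fun position q =>
      if 0 ≤ q.2.1 ∧ q.2.1 < 12 ∧ 0 ≤ q.1 ∧ q.1 < 8 then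
        pvCellWrite position q.2.1 q.1 (q.2.2.1, q.2.2.2.1, q.2.2.2.2)
      else position) pos) := by
  induction l with
  | nil => exact fun pos h => h
  | cons q l ih =>
    intro pos h
    rw [List.foldl_cons]
    refine ih _ ?_
    by_cases hb : 0 ≤ q.2.1 ∧ q.2.1 < 12 ∧ 0 ≤ q.1 ∧ q.1 < 8
    · rw [if_pos hb]
      exact pvShape_cellWrite _ _ _ _ h ⟨hb.1, hb.2.1⟩
    · rw [if_neg hb]
      exact h

lemma pvCellB :
    ∀ (l : List (Int × Int × Int × Int × Int)), (l.map (fun q => (q.1, q.2.1))).Nodup →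
    ∀ (pos : List (List (Int × Int × Int))), pvShape pos →
    ∀ (i' j' : Nat), i' < 12 → j' < 8 →
    pvCell (l.foldl (fun position q =>
      if 0 ≤ q.2.1 ∧ q.2.1 < 12 ∧ 0 ≤ q.1 ∧ q.1 < 8 then
        pvCellWrite position q.2.1 q.1 (q.2.2.1, q.2.2.2.1, q.2.2.2.2)
      else position) pos) i' j' =
      (pvLk l (j' : Int) (i' : Int)).getD (pvCell pos i' j') := by
  intro l
  induction l with
  | nil =>
    intro _ pos _ i' j' _ _
    simp [pvLk, List.foldl_nil]
  | cons q l ih =>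
    intro hnd pos hpos i' j' hi' hj'
    rw [List.map_cons, List.nodup_cons] at hnd
    rw [List.foldl_cons]
    by_cases hkey : q.1 = (j' : Int) ∧ q.2.1 = (i' : Int)
    · have hb : 0 ≤ q.2.1 ∧ q.2.1 < 12 ∧ 0 ≤ q.1 ∧ q.1 < 8 := by
        rw [hkey.1, hkey.2]; omega
      have hnone : l.find? (fun p => p.1 == ((j' : Nat) : Int) && p.2.1 == ((i' : Nat) : Int)) = none := by
        rw [List.find?_eq_none]
        intro x hx
        simp only [Bool.and_eq_true, beq_iff_eq, not_and]
        intro e1 e2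
        exact absurd (List.mem_map.mpr ⟨x, hx, by rw [e1, e2, hkey.1, hkey.2]⟩) hnd.1
      rw [if_pos hb,
          ih hnd.2 _ (pvShape_cellWrite _ _ _ _ hpos ⟨hb.1, hb.2.1⟩) i' j' hi' hj',
          pvCell_cellWrite pos q.2.1 q.1 _ hpos ⟨hb.1, hb.2.1⟩ ⟨hb.2.2.1, hb.2.2.2⟩ i' j' hi' hj',
          if_pos ⟨hkey.2, hkey.1⟩]
      have hpred : (q.1 == ((j' : Nat) : Int) && q.2.1 == ((i' : Nat) : Int)) = true := by
        simp [hkey.1, hkey.2]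
      have hcons : List.find? (fun p : Int × Int × Int × Int × Int => p.1 == ((j' : Nat) : Int) && p.2.1 == ((i' : Nat) : Int)) (q :: l) = some q :=
        List.find?_cons_of_pos hpred
      rw [pvLk, pvLk, hcons, hnone]
      simp
    · have hpred : (q.1 == ((j' : Nat) : Int) && q.2.1 == ((i' : Nat) : Int)) = false := by
        by_cases h1 : q.1 = ((j' : Nat) : Int)
        · have h2 : q.2.1 ≠ ((i' : Nat) : Int) := fun h2 => hkey ⟨h1, h2⟩
          simp [h2]
        · simp [h1]
      have hLk : pvLk (q :: l) ((j' : Nat) : Int) ((i' : Nat) : Int) = pvLk l ((j' : Nat) : Int) ((i' : Nat) : Int) := by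
        have hcons : List.find? (fun p : Int × Int × Int × Int × Int => p.1 == ((j' : Nat) : Int) && p.2.1 == ((i' : Nat) : Int)) (q :: l) =
            List.find? (fun p : Int × Int × Int × Int × Int => p.1 == ((j' : Nat) : Int) && p.2.1 == ((i' : Nat) : Int)) l :=
          List.find?_cons_of_neg (by simp [hpred])
        rw [pvLk, pvLk, hcons]
      rw [hLk]
      by_cases hb : 0 ≤ q.2.1 ∧ q.2.1 < 12 ∧ 0 ≤ q.1 ∧ q.1 < 8
      · rw [if_pos hb,
            ih hnd.2 _ (pvShape_cellWrite _ _ _ _ hpos ⟨hb.1, hb.2.1⟩) i' j' hi' hj',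
            pvCell_cellWrite pos q.2.1 q.1 _ hpos ⟨hb.1, hb.2.1⟩ ⟨hb.2.2.1, hb.2.2.2⟩ i' j' hi' hj',
            if_neg (fun hc => hkey ⟨hc.2, hc.1⟩)]
      · rw [if_neg hb, ih hnd.2 _ hpos i' j' hi' hj']

lemma pvGrid_ext (p q : List (List (Int × Int × Int))) (hp : pvShape p) (hq : pvShape q)
    (h : ∀ i' j' : Nat, i' < 12 → j' < 8 → pvCell p i' j' = pvCell q i' j') : p = q := by
  apply List.ext_getElem (by rw [hp.1, hq.1])
  intro i h1 h2
  have hpl : p[i].length = 8 := hp.2 _ (p.getElem_mem h1)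
  have hql : q[i].length = 8 := hq.2 _ (q.getElem_mem h2)
  apply List.ext_getElem (by rw [hpl, hql])
  intro j hj1 hj2
  have hi12 : i < 12 := by rw [← hp.1]; exact h1
  have hcell := h i j hi12 (by omega)
  rw [pvCell, pvCell, List.getD_eq_getElem p [] h1, List.getD_eq_getElem q [] h2,
      List.getD_eq_getElem _ _ hj1, List.getD_eq_getElem _ _ hj2] at hcell
  exact hcell

-- ===== VERDICT (by name: the statement is the Claim_ definition above) =====
theorem sozdanie_polya_spec : Claim_equal_sozdanie_polya := by
  intro occupied _ hpre
  unfold Spec_sozdanie_polya sozdanie_polya sozdanie_polya_alt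
  have hrange12 : ∀ x ∈ PySem.List.pyRange 0 12 1, 0 ≤ x ∧ x < 12 := by
    intro x hx
    rw [PySem.List.mem_pyRange_one] at hx
    exact hx
  apply pvGrid_ext
  · exact pvShape_outerA occupied _ hrange12 _ pvShape_blank
  · exact pvShapeB occupied _ pvShape_blank
  · intro i' j' hi' hj'
    rw [pvOuterA occupied _ hrange12 _ pvShape_blank i' j' hi' hj',
        pvCellB occupied hpre _ pvShape_blank i' j' hi' hj',
        if_pos (by rw [PySem.List.mem_pyRange_one]; omega)]
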